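-- pv_equiv track=rewrite | github.com/raeez/igusa-cusp-form | compute/verify_square_root.py | free_lie_multidegree_dimension
-- ===== SOURCE A (Python) =====
-- from math import comb, factorial, gcd
--
-- def mobius(value: int) -> int:
--     n = value
--     prime_factors = 0
--     divisor = 2
--     while divisor * divisor <= n:
--         if n % divisor == 0:
--             n //= divisor
--             prime_factors += 1
--             if n % divisor == 0:
--                 return 0
--             while n % divisor == 0:
--                 n //= divisor
--         divisor += 1
--     if n > 1:
--         prime_factors += 1
--     return -1 if prime_factors % 2 else 1
--
-- def free_lie_multidegree_dimension(multidegree: tuple[int, ...]) -> int: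
--     """Witt dimension for the free Lie algebra in a fixed multidegree."""
--
--     total = sum(multidegree)
--     common = 0
--     for entry in multidegree:
--         common = gcd(common, entry)
--
--     numerator = 0
--     for divisor in range(1, common + 1):
--         if common % divisor != 0:
--             continue
--         term = factorial(total // divisor)
--         for entry in multidegree:
--             term //= factorial(entry // divisor)
--         numerator += mobius(divisor) * term
--     return numerator // total
-- ===== SOURCE B (Python) =====
-- from math import factorial, gcd
--
--
-- def mobius(value: int) -> int:
--     n = value
--     prime_factors = 0
--     divisor = 2
--     while divisor * divisor <= n:
--         if n % divisor == 0:
--             n //= divisor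
--             prime_factors += 1
--             if n % divisor == 0:
--                 return 0
--             while n % divisor == 0:
--                 n //= divisor
--         divisor += 1
--     if n > 1:
--         prime_factors += 1
--     return -1 if prime_factors % 2 else 1
--
--
-- def free_lie_multidegree_dimension(multidegree):
--     """Witt dimension, enumerating divisors of the gcd in cofactor pairs up to its
--     square root instead of scanning every integer from 1 to the gcd."""
--     total = sum(multidegree)
--     common = 0
--     for entry in multidegree:
--         common = gcd(common, entry)
--
--     def signed_term(d):
--         t = factorial(total // d)
--         for entry in multidegree:
--             t //= factorial(entry // d)
--         return mobius(d) * t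
--
--     numerator = 0
--     d = 1
--     while d * d <= common:
--         if common % d == 0:
--             numerator += signed_term(d)
--             q = common // d
--             if q != d:
--                 numerator += signed_term(q)
--         d += 1
--     return numerator // total
-- ===== Notes on version B (the rewrite author's own statement) =====
-- stated objective: alternative
-- what changed: Replaces A's scan of every integer from 1 to gcd(multidegree) (testing each for divisibility) by a while loop up to the square root of the gcd that emits each divisor d together with its cofactor gcd//d, so each divisor pair is visited once.
import Mathlib
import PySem

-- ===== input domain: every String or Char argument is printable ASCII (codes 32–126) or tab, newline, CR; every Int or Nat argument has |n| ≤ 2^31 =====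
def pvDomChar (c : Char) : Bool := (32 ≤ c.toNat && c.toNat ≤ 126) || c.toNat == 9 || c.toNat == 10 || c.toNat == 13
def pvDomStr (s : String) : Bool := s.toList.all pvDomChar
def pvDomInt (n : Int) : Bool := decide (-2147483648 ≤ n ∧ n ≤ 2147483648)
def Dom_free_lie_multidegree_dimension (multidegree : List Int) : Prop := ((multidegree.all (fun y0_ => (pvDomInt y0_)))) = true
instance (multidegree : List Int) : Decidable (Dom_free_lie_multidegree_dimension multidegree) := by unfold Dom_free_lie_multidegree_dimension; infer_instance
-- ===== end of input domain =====

-- B replaces A's scan of every integer 1..gcd by a divisor-pair enumeration up to √gcd; equal return values proved on Pre_ (nonnegative entries, positive sum).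

-- ===== PORT A =====
-- math.factorial: exact for n ≥ 0; negative arguments raise ValueError in Python and are excluded by Pre_.
def pyFactorial (n : Int) : Int := (Nat.factorial n.toNat : Int)

-- shared helper `mobius` (identical source in Source A and Source B).
-- the `while n % divisor == 0` in Python's mobius is dead code (only reached right after the
-- `return 0` check has established n % divisor != 0), so it is omitted.
-- fuel = value.toNat + 2 bounds the iterations (divisor grows by 1 each pass, guard needs divisor ≤ n ≤ value);
-- the fuel-0 branch is the same post-loop code as the guard-false branch and is never reached.
def mobiusFinish (n pf : Int) : Int :=
  let pf := if n > 1 then pf + 1 else pf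
  if PySem.Int.mod pf 2 ≠ 0 then -1 else 1

def mobiusLoop : Nat → Int → Int → Int → Int
  | 0, n, _, pf => mobiusFinish n pf
  | fuel+1, n, d, pf =>
    if d * d ≤ n then
      (if PySem.Int.mod n d = 0 then
        let n' := PySem.Int.floordiv n d
        if PySem.Int.mod n' d = 0 then 0
        else mobiusLoop fuel n' (d + 1) (pf + 1)
      else mobiusLoop fuel n (d + 1) pf)
    else mobiusFinish n pf

def mobius (value : Int) : Int := mobiusLoop (value.toNat + 2) value 2 0

def free_lie_multidegree_dimension (multidegree : List Int) : Int :=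
  let total := multidegree.foldl (· + ·) 0
  let common := multidegree.foldl (fun c e => ((Int.gcd c e : Nat) : Int)) 0
  let numerator := (PySem.List.pyRange 1 (common + 1) 1).foldl
    (fun acc d =>
      if PySem.Int.mod common d ≠ 0 then acc
      else
        acc + mobius d *
          multidegree.foldl
            (fun t e => PySem.Int.floordiv t (pyFactorial (PySem.Int.floordiv e d)))
            (pyFactorial (PySem.Int.floordiv total d))) 0
  PySem.Int.floordiv numerator total

-- ===== PORT B =====
def signedTerm (multidegree : List Int) (total d : Int) : Int :=
  mobius d *
    multidegree.foldl
      (fun t e => PySem.Int.floordiv t (pyFactorial (PySem.Int.floordiv e d)))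
      (pyFactorial (PySem.Int.floordiv total d))

-- fuel = common.toNat + 2 bounds the iterations (d grows by 1 from 1, guard needs d*d ≤ common); fuel 0 never reached.
def altLoop (multidegree : List Int) (total common : Int) : Nat → Int → Int → Int
  | 0, _, acc => acc
  | fuel+1, d, acc =>
    if d * d ≤ common then
      altLoop multidegree total common fuel (d + 1)
        (if PySem.Int.mod common d = 0 then
          let acc' := acc + signedTerm multidegree total d
          let q := PySem.Int.floordiv common d
          if q ≠ d then acc' + signedTerm multidegree total q else acc'
        else acc)
    else acc

def free_lie_multidegree_dimension_alt (multidegree : List Int) : Int :=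
  let total := multidegree.foldl (· + ·) 0
  let common := multidegree.foldl (fun c e => ((Int.gcd c e : Nat) : Int)) 0
  let numerator := altLoop multidegree total common (common.toNat + 2) 1 0
  PySem.Int.floordiv numerator total

-- ===== PRECONDITION & SPEC =====
-- Pre_ excludes exactly the inputs where A raises: a negative entry makes factorial raise
-- ValueError, and a list summing to 0 makes the final `numerator // total` raise ZeroDivisionError.
def Pre_free_lie_multidegree_dimension (multidegree : List Int) : Prop :=
  (∀ x ∈ multidegree, 0 ≤ x) ∧ 0 < multidegree.sum
instance (multidegree : List Int) : Decidable (Pre_free_lie_multidegree_dimension multidegree) := by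
  unfold Pre_free_lie_multidegree_dimension; infer_instance

def pvWitness_free_lie_multidegree_dimension : List Int := [2, 4]

def Spec_free_lie_multidegree_dimension (multidegree : List Int) (out : Int) : Prop := out = free_lie_multidegree_dimension_alt multidegree
instance (multidegree : List Int) (out : Int) : Decidable (Spec_free_lie_multidegree_dimension multidegree out) := by unfold Spec_free_lie_multidegree_dimension; infer_instance

-- ===== CLAIM (what is proved, stated in full; the proofs are below) =====
def Claim_equal_free_lie_multidegree_dimension : Prop := ∀ (multidegree : List Int), Dom_free_lie_multidegree_dimension multidegree → Pre_free_lie_multidegree_dimension multidegree → Spec_free_lie_multidegree_dimension multidegree (free_lie_multidegree_dimension multidegree)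

-- ===== LEMMAS AND PROOFS =====

-- the Int gcd fold is the cast of a Nat gcd fold
lemma gcdFold_natCast (l : List Int) (c : Nat) :
    l.foldl (fun c e => ((Int.gcd c e : Nat) : Int)) (c : Int)
      = ((l.foldl (fun c e => Nat.gcd c e.natAbs) c : Nat) : Int) := by
  induction l generalizing c with
  | nil => rfl
  | cons x xs ih => simpa [Int.gcd] using ih (Nat.gcd c x.natAbs)

lemma natGcdFold_eq_zero (l : List Int) : ∀ c : Nat,
    l.foldl (fun c e => Nat.gcd c e.natAbs) c = 0 → c = 0 ∧ ∀ x ∈ l, x = 0 := by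
  induction l with
  | nil => intro c h; exact ⟨h, by simp⟩
  | cons x xs ih =>
    intro c h
    obtain ⟨hg, hxs⟩ := ih (Nat.gcd c x.natAbs) h
    rw [Nat.gcd_eq_zero_iff] at hg
    refine ⟨hg.1, ?_⟩
    intro y hy
    rcases List.mem_cons.mp hy with hy | hy
    · rw [hy]; exact Int.natAbs_eq_zero.mp hg.2
    · exact hxs y hy

-- list-sum over List.range as a Finset sum (used to reshape A's loop)
lemma listSumRange (g : Nat → Int) (n : Nat) :
    ((List.range n).map g).sum = ∑ i ∈ Finset.range n, g i := by
  induction n with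
  | zero => simp
  | succ n ih =>
    rw [List.range_succ, List.map_append, List.sum_append, Finset.sum_range_succ, ih]
    simp

-- A's numerator loop is the sum of f over the divisors of n
lemma loopA_eq (f : Int → Int) (n : Nat) :
    (PySem.List.pyRange 1 ((n : Int) + 1) 1).foldl
      (fun acc d => if PySem.Int.mod (n : Int) d ≠ 0 then acc else acc + f d) 0
      = ∑ d ∈ n.divisors, f (d : Int) := by
  have h1 : (fun (acc d : Int) => if PySem.Int.mod (n : Int) d ≠ 0 then acc else acc + f d)
      = fun acc d => acc + (if PySem.Int.mod (n : Int) d ≠ 0 then 0 else f d) := by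
    funext acc d; split <;> simp
  rw [h1, PySem.List.foldl_add, zero_add, PySem.List.pyRange_one]
  have h2 : ((n : Int) + 1 - 1).toNat = n := by omega
  rw [h2, List.map_map, listSumRange]
  have h4 : (∑ d ∈ Finset.Ico 1 (n + 1), (if PySem.Int.mod (n : Int) (d : Int) ≠ 0 then 0 else f (d : Int)))
      = ∑ i ∈ Finset.range n,
          ((fun d => if PySem.Int.mod (n : Int) d ≠ 0 then 0 else f d) ∘ fun k : Nat => (1 : Int) + (k : Int)) i := by
    rw [Finset.sum_Ico_eq_sum_range]
    simp only [Nat.add_sub_cancel]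
    apply Finset.sum_congr rfl
    intro i _
    have : ((1 + i : Nat) : Int) = 1 + (i : Int) := by push_cast; ring
    simp [this]
  rw [← h4, Nat.divisors, Finset.sum_filter]
  apply Finset.sum_congr rfl
  intro d _
  have hiff : PySem.Int.mod (n : Int) (d : Int) = 0 ↔ (d : Int) ∣ (n : Int) :=
    PySem.Int.mod_eq_zero_iff_dvd _ _
  by_cases hdvd : d ∣ n
  · have hm : PySem.Int.mod (n : Int) (d : Int) = 0 :=
      hiff.mpr (Int.natCast_dvd_natCast.mpr hdvd)
    simp [hdvd, hm]
  · have hm : PySem.Int.mod (n : Int) (d : Int) ≠ 0 := fun h =>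
      hdvd (Int.natCast_dvd_natCast.mp (hiff.mp h))
    rw [if_pos hm, if_neg hdvd]

-- B's while loop accumulates the paired terms for d ∈ [d₀, √n]
lemma altLoop_eq (md : List Int) (total : Int) (n : Nat) :
    ∀ (fuel d : Nat) (acc : Int), Nat.sqrt n + 1 ≤ fuel + d →
    altLoop md total (n : Int) fuel (d : Int) acc
      = acc + ∑ k ∈ Finset.Ico d (Nat.sqrt n + 1),
          (if k ∣ n then
            signedTerm md total (k : Int)
              + (if n / k ≠ k then signedTerm md total ((n / k : Nat) : Int) else 0)
          else 0) := by
  intro fuel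
  induction fuel with
  | zero =>
    intro d acc h
    rw [Finset.Ico_eq_empty (by omega : ¬ d < Nat.sqrt n + 1)]
    simp [altLoop]
  | succ fuel ih =>
    intro d acc h
    simp only [altLoop]
    by_cases hd : d ≤ Nat.sqrt n
    · have hguard : ((d : Int) * (d : Int) ≤ (n : Int)) := by
        exact_mod_cast Nat.le_sqrt.mp hd
      rw [if_pos hguard]
      have hcast1 : ((d : Int) + 1) = ((d + 1 : Nat) : Int) := by push_cast; ring
      rw [hcast1, ih (d + 1) _ (by omega),
        Finset.sum_eq_sum_Ico_succ_bot (by omega : d < Nat.sqrt n + 1)]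
      by_cases hdvd : d ∣ n
      · have hm : PySem.Int.mod (n : Int) (d : Int) = 0 :=
          (PySem.Int.mod_eq_zero_iff_dvd _ _).mpr (Int.natCast_dvd_natCast.mpr hdvd)
        rw [if_pos hm, if_pos hdvd]
        simp only [PySem.Int.floordiv_natCast]
        by_cases hne : n / d ≠ d
        · have hne' : ((n / d : Nat) : Int) ≠ (d : Int) := by exact_mod_cast hne
          rw [if_pos hne', if_pos hne]; ring
        · have hne2 : n / d = d := not_not.mp hne
          have hne' : ¬ ((n / d : Nat) : Int) ≠ (d : Int) := by simp [hne2]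
          rw [if_neg hne', if_neg hne]; ring
      · have hm : PySem.Int.mod (n : Int) (d : Int) ≠ 0 := fun hc =>
          hdvd (Int.natCast_dvd_natCast.mp ((PySem.Int.mod_eq_zero_iff_dvd _ _).mp hc))
        rw [if_neg hm, if_neg hdvd]; ring
    · have hguard : ¬ ((d : Int) * (d : Int) ≤ (n : Int)) := by
        intro hc
        exact hd (Nat.le_sqrt.mpr (by exact_mod_cast hc))
      rw [if_neg hguard, Finset.Ico_eq_empty (by omega : ¬ d < Nat.sqrt n + 1)]
      simp

-- the paired √n enumeration covers each divisor exactly once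
lemma pairing (f : Nat → Int) (n : Nat) (hn : 1 ≤ n) :
    (∑ k ∈ Finset.Ico 1 (Nat.sqrt n + 1),
      (if k ∣ n then f k + (if n / k ≠ k then f (n / k) else 0) else 0))
      = ∑ d ∈ n.divisors, f d := by
  have hn0 : n ≠ 0 := by omega
  set s := Nat.sqrt n with hs
  rw [← Finset.sum_filter]
  have hfilter : (Finset.Ico 1 (s + 1)).filter (fun k => k ∣ n)
      = n.divisors.filter (fun k => k ≤ s) := by
    ext k
    simp only [Finset.mem_filter, Finset.mem_Ico, Nat.mem_divisors]
    constructor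
    · rintro ⟨⟨h1, h2⟩, h3⟩
      exact ⟨⟨h3, hn0⟩, by omega⟩
    · rintro ⟨⟨h1, h2⟩, h3⟩
      exact ⟨⟨Nat.pos_of_dvd_of_pos h1 (by omega), by omega⟩, h1⟩
  rw [hfilter, Finset.sum_add_distrib]
  have h2 : (∑ k ∈ n.divisors.filter (fun k => k ≤ s), if n / k ≠ k then f (n / k) else 0)
      = ∑ k ∈ (n.divisors.filter (fun k => k ≤ s)).filter (fun k => n / k ≠ k), f (n / k) :=
    (Finset.sum_filter _ _).symm
  rw [h2]
  have key : (∑ k ∈ (n.divisors.filter (fun k => k ≤ s)).filter (fun k => n / k ≠ k), f (n / k))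
      = ∑ m ∈ n.divisors.filter (fun k => ¬ k ≤ s), f m := by
    refine Finset.sum_nbij' (fun k => n / k) (fun m => n / m) ?_ ?_ ?_ ?_ ?_
    · intro k hk
      simp only [Finset.mem_filter, Nat.mem_divisors] at hk ⊢
      obtain ⟨⟨⟨hdvd, -⟩, hks⟩, hne⟩ := hk
      have hk1 : 0 < k := Nat.pos_of_dvd_of_pos hdvd (by omega)
      have hmul : k * (n / k) = n := Nat.mul_div_cancel' hdvd
      have hkk : k * k ≤ n := Nat.le_sqrt.mp (by omega)
      have hlt : k < n / k := by
        rcases Nat.lt_or_ge k (n / k) with hlt | hge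
        · exact hlt
        · exfalso
          apply hne
          have hle : n ≤ k * k := by
            calc n = k * (n / k) := hmul.symm
              _ ≤ k * k := Nat.mul_le_mul_left k hge
          have hnk : n = k * k := le_antisymm hle hkk
          have : k * (n / k) = k * k := by rw [hmul, hnk]
          exact Nat.eq_of_mul_eq_mul_left hk1 this
      have hpos : 0 < n / k := hk1.trans hlt
      have hbig : n < (n / k) * (n / k) := by
        calc n = k * (n / k) := hmul.symm
          _ < (n / k) * (n / k) := (Nat.mul_lt_mul_right hpos).mpr hlt
      refine ⟨⟨Nat.div_dvd_of_dvd hdvd, hn0⟩, ?_⟩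
      have := Nat.sqrt_lt.mpr hbig
      omega
    · intro m hm
      simp only [Finset.mem_filter, Nat.mem_divisors] at hm ⊢
      obtain ⟨⟨hdvd, -⟩, hms⟩ := hm
      have hm1 : 0 < m := Nat.pos_of_dvd_of_pos hdvd (by omega)
      have hmul : m * (n / m) = n := Nat.mul_div_cancel' hdvd
      have hmm : n < m * m := Nat.sqrt_lt.mp (by omega)
      have hlt : n / m < m := by
        by_contra hcon
        have : m * m ≤ m * (n / m) := Nat.mul_le_mul_left m (Nat.le_of_not_lt hcon)
        omega
      refine ⟨⟨⟨Nat.div_dvd_of_dvd hdvd, hn0⟩, ?_⟩, ?_⟩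
      · have hle : (n / m) * (n / m) ≤ n := by
          calc (n / m) * (n / m) ≤ (n / m) * m := Nat.mul_le_mul_left _ (le_of_lt hlt)
            _ = n := by rw [Nat.mul_comm]; exact hmul
        have := Nat.le_sqrt.mpr hle
        omega
      · rw [Nat.div_div_self hdvd hn0]
        omega
    · intro k hk
      simp only [Finset.mem_filter, Nat.mem_divisors] at hk
      exact Nat.div_div_self hk.1.1.1 hn0
    · intro m hm
      simp only [Finset.mem_filter, Nat.mem_divisors] at hm
      exact Nat.div_div_self hm.1.1 hn0
    · intro k _
      rfl
  rw [key]
  exact Finset.sum_filter_add_sum_filter_not _ _ _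

-- ===== VERDICT (by name: the statement is the Claim_ definition above) =====
theorem free_lie_multidegree_dimension_spec : Claim_equal_free_lie_multidegree_dimension := by
  intro md _hdom hpre
  obtain ⟨hnn, hsum⟩ := hpre
  unfold Spec_free_lie_multidegree_dimension
  unfold free_lie_multidegree_dimension free_lie_multidegree_dimension_alt
  simp only []
  set total := md.foldl (· + ·) 0 with htot
  set cI := md.foldl (fun c e => ((Int.gcd c e : Nat) : Int)) 0 with hcI
  set n := md.foldl (fun c e => Nat.gcd c e.natAbs) 0 with hn
  have hcast : cI = (n : Int) := by simpa using gcdFold_natCast md 0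
  have hn1 : 1 ≤ n := by
    rcases Nat.eq_zero_or_pos n with h0 | h1
    · exfalso
      obtain ⟨-, hall⟩ := natGcdFold_eq_zero md 0 (hn ▸ h0)
      have : md.sum = 0 := List.sum_eq_zero hall
      omega
    · exact h1
  rw [hcast]
  congr 1
  rw [Int.toNat_natCast]
  have hB := altLoop_eq md total n (n + 2) 1 0 (by have := Nat.sqrt_le_self n; omega)
  rw [Nat.cast_one] at hB
  rw [hB, zero_add, pairing (fun k => signedTerm md total (k : Int)) n hn1,
    ← loopA_eq (fun d => signedTerm md total d) n]
  rfl
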